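-- pv_equiv track=rewrite | github.com/davidbelfiori/Foi | eserciziesame/ricorsione.py | elimina
-- ===== SOURCE A (Python) =====
-- def elimina(s):
--     if not s:
--         return ""
--     elif len(s)==1:
--         return s
--     elif s[0]==s[1]:
--         return elimina(s[1:])
--     else:
--         return s[0]+elimina(s[1:])
-- ===== SOURCE B (Python) =====
-- def elimina(s):
--     out = []
--     for c in s:
--         if not out or out[-1] != c:
--             out.append(c)
--     return "".join(out)
-- ===== Notes on version B (the rewrite author's own statement) =====
-- stated objective: faster
-- what changed: Replaces the front-peeling recursion with repeated string slicing by a single iterative pass that appends a character only when it differs from the last kept one.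
import Mathlib
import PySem

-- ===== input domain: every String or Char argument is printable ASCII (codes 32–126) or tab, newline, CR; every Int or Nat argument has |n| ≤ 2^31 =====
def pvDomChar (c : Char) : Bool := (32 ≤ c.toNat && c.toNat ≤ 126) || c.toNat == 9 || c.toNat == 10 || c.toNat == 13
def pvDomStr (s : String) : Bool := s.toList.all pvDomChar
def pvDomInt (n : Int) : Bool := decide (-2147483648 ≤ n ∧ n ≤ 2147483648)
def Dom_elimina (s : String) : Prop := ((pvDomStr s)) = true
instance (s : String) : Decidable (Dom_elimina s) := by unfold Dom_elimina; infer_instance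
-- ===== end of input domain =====

-- B replaces A's front-peeling recursion (with string slicing) by one iterative
-- left-to-right pass over the characters that appends a character only when it
-- differs from the last character already kept.

-- ===== PORT A =====
-- A's recursion on the string's characters: empty → "", single → itself,
-- first two equal → drop the first, otherwise keep the first and recurse on s[1:].
def eliminaL : List Char → List Char
  | [] => []
  | [c] => [c]
  | a :: b :: t => if a == b then eliminaL (b :: t) else a :: eliminaL (b :: t)

def elimina (s : String) : String := String.mk (eliminaL s.toList)

-- ===== PORT B =====
-- B's loop body: append c unless the accumulator is nonempty and ends in c.
def eliminaStep (out : List Char) (c : Char) : List Char :=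
  if out.isEmpty || !(out.getLast? == some c) then out ++ [c] else out

def elimina_alt (s : String) : String :=
  String.mk (s.toList.foldl eliminaStep [])

-- ===== PRECONDITION & SPEC =====
def Spec_elimina (s : String) (out : String) : Prop := out = elimina_alt s
instance (s : String) (out : String) : Decidable (Spec_elimina s out) := by unfold Spec_elimina; infer_instance

-- ===== CLAIM (what is proved, stated in full; the proofs are below) =====
def Claim_equal_elimina : Prop := ∀ (s : String), Dom_elimina s → Spec_elimina s (elimina s)

-- ===== LEMMAS AND PROOFS =====

-- eliminaL on a nonempty list is nonempty and starts with the first character.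
theorem eliminaL_head (c : Char) (l : List Char) :
    eliminaL (c :: l) = c :: (eliminaL (c :: l)).tail := by
  induction l generalizing c with
  | nil => simp [eliminaL]
  | cons a t ih =>
    by_cases h : c = a
    · subst h
      simpa [eliminaL] using ih c
    · simp [eliminaL, h]

-- Loop invariant: running B's fold from a nonempty accumulator whose last
-- character is c computes the accumulator followed by the rest of A's result.
theorem foldl_step (l : List Char) (acc : List Char) (c : Char)
    (hne : acc ≠ []) (hlast : acc.getLast? = some c) :
    l.foldl eliminaStep acc = acc ++ (eliminaL (c :: l)).tail := by
  induction l generalizing acc c with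
  | nil => simp [eliminaL]
  | cons a t ih =>
    by_cases h : a = c
    · subst h
      have hstep : eliminaStep acc a = acc := by
        simp [eliminaStep, List.isEmpty_iff, hne, hlast]
      have := ih acc a hne hlast
      simp only [List.foldl_cons, hstep, this]
      simp [eliminaL]
    · have hstep : eliminaStep acc a = acc ++ [a] := by
        have : ¬ (acc.getLast? == some a) = true := by
          simp [hlast]; exact fun hh => h hh.symm
        simp [eliminaStep, this]
      have hlast' : (acc ++ [a]).getLast? = some a := by simp
      have := ih (acc ++ [a]) a (by simp) hlast'
      simp only [List.foldl_cons, hstep, this]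
      have hA : eliminaL (c :: a :: t) = c :: eliminaL (a :: t) := by
        simp [eliminaL, (by simpa using fun hh => h hh.symm : ¬ (c == a) = true)]
      rw [hA]
      simp only [List.append_assoc, List.singleton_append, List.tail_cons]
      rw [← eliminaL_head a t]

theorem eliminaL_eq_fold (l : List Char) :
    l.foldl eliminaStep [] = eliminaL l := by
  cases l with
  | nil => simp [eliminaL]
  | cons c t =>
    have hstep : eliminaStep [] c = [c] := by simp [eliminaStep]
    have := foldl_step t [c] c (by simp) (by simp)
    simp only [List.foldl_cons, hstep, this]
    conv_rhs => rw [eliminaL_head c t]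
    simp

-- ===== VERDICT (by name: the statement is the Claim_ definition above) =====
theorem elimina_spec : Claim_equal_elimina := by
  intro s _
  unfold Spec_elimina elimina elimina_alt
  rw [eliminaL_eq_fold]
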